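-- pv_equiv track=rewrite | github.com/TheEggHealer/ordel-bot | bot.py | is_word_possible
-- ===== SOURCE A (Python) =====
-- def is_word_possible(word, current_word, included_letters, impossible_letters, previous_guesses):
--   for i, letter in enumerate(word):
--     if current_word[i] != None and letter != current_word[i]:
--       return False
--     if letter in impossible_letters:
--       return False
--     if any(letter == guess[i] and current_word[i] != guess[i] for guess in previous_guesses):
--       return False
--
--   if any(l not in word for l in included_letters):
--     return False
--   return True
-- ===== SOURCE B (Python) =====
-- def is_word_possible(word, current_word, included_letters, impossible_letters, previous_guesses):
--     if any(l not in word for l in included_letters):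
--         return False
--
--     def ok(i):
--         if i == len(word):
--             return True
--         c = word[i]
--         slot = current_word[i]
--         if c in impossible_letters:
--             return False
--         if slot is None:
--             if any(c == g[i] for g in previous_guesses):
--                 return False
--         elif c != slot:
--             return False
--         return ok(i + 1)
--
--     return ok(0)
-- ===== Notes on version B (the rewrite author's own statement) =====
-- stated objective: alternative
-- what changed: B short-circuits the required-letters check up front and then walks positions recursively, consulting previous_guesses only at open (None) slots with a plain letter comparison, exploiting the invariant that a fixed, matched slot can never be vetoed by a guess; A instead runs the full nested guess scan with a two-part condition at every position and checks required letters last.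
import Mathlib
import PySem

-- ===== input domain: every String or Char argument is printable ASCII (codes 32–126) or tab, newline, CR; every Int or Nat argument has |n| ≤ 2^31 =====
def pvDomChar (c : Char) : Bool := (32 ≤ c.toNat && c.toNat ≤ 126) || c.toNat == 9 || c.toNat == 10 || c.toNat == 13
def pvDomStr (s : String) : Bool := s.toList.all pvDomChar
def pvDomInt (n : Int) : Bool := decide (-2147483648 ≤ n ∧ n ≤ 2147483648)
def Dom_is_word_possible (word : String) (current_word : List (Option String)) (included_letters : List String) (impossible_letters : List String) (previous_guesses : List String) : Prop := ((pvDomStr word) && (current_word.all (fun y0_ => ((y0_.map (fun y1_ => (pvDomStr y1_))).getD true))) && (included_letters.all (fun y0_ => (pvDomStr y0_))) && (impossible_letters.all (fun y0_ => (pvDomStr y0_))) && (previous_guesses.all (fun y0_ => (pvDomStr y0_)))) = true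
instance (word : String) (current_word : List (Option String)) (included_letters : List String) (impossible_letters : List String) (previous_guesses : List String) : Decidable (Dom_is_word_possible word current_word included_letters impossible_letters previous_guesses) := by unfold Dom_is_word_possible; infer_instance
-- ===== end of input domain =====

-- B checks the required letters first, then walks positions recursively, scanning the previous
-- guesses only at open (None) slots — a fixed, matched slot can never be vetoed by a guess
-- (objective: alternative; same return value on Pre_).

-- ===== PORT A =====
-- Where Python A raises IndexError (current_word[i] or guess[i] out of range), the port
-- returns false in that branch; all such inputs are outside Pre_.
def pvALoop (current_word : List (Option String)) (included_letters : List String) (impossible_letters : List String) (previous_guesses : List String) (word : String) : Int → List Char → Bool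
  | _, [] =>
    if included_letters.any (fun l => !(PySem.Str.isIn l word)) then false else true
  | i, c :: rest =>
    match PySem.List.pyGet? current_word i with
    | none => false  -- current_word[i] raises IndexError in Python; outside Pre_
    | some cwi =>
      let letter := String.mk [c]
      if (match cwi with | some s => letter != s | none => false) then false
      else if impossible_letters.contains letter then false
      else if previous_guesses.any (fun guess =>
          match PySem.Str.pyGet? guess i with
          | none => false  -- guess[i] raises IndexError in Python; outside Pre_
          | some gc => letter == String.mk [gc] && decide (cwi ≠ some (String.mk [gc]))) then false
      else pvALoop current_word included_letters impossible_letters previous_guesses word (i+1) rest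

def is_word_possible (word : String) (current_word : List (Option String)) (included_letters : List String) (impossible_letters : List String) (previous_guesses : List String) : Bool :=
  pvALoop current_word included_letters impossible_letters previous_guesses word 0 word.toList

-- ===== PORT B =====
-- the recursive helper ok(i) of Source B
def pvBok (w : List Char) (current_word : List (Option String)) (impossible_letters : List String) (previous_guesses : List String) (i : Nat) : Bool :=
  if h : i < w.length then
    let c := w[i]
    match current_word[i]? with
    | none => false  -- current_word[i] raises IndexError in Python; outside Pre_
    | some slot =>
      if impossible_letters.contains (String.mk [c]) then false
      else
        match slot with
        | none =>
          if previous_guesses.any (fun g =>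
              match PySem.Str.pyGet? g (i : Int) with
              | none => false  -- g[i] raises IndexError in Python; outside Pre_
              | some gc => String.mk [c] == String.mk [gc]) then false
          else pvBok w current_word impossible_letters previous_guesses (i+1)
        | some s =>
          if String.mk [c] != s then false
          else pvBok w current_word impossible_letters previous_guesses (i+1)
  else true
termination_by w.length - i

def is_word_possible_alt (word : String) (current_word : List (Option String)) (included_letters : List String) (impossible_letters : List String) (previous_guesses : List String) : Bool :=
  if included_letters.any (fun l => !(PySem.Str.isIn l word)) then false
  else pvBok word.toList current_word impossible_letters previous_guesses 0

-- ===== PRECONDITION & SPEC =====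
-- the condition of A's inner any at position i for one guess g (false where g[i] is out of range)
def pvMatchG (c : Char) (cwi : Option String) (g : String) (i : Nat) : Bool :=
  match PySem.Str.pyGet? g (i : Int) with
  | none => false
  | some gc => String.mk [c] == String.mk [gc] && decide (cwi ≠ some (String.mk [gc]))

-- position i does not fail A's pattern check
def pvPatOK (c : Char) (cwi : Option String) : Bool :=
  match cwi with | some s => String.mk [c] == s | none => true

-- A's scan passes position i without returning and without raising
def pvPassB (w : List Char) (cw : List (Option String)) (imp : List String) (G : List String) (i : Nat) : Bool :=
  decide (i < w.length) && decide (i < cw.length) &&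
    (pvPatOK (w.getD i ' ') (cw.getD i none)
     && !(imp.contains (String.mk [w.getD i ' ']))
     && G.all (fun g => decide (i < g.toList.length) && !(pvMatchG (w.getD i ' ') (cw.getD i none) g i)))

-- some guess too short for position i is reached before any matching guess
def pvGuessRaise (c : Char) (cwi : Option String) (G : List String) (i : Nat) : Bool :=
  (List.range G.length).any (fun k =>
    decide ((G.getD k "").toList.length ≤ i) &&
    (List.range k).all (fun k' =>
      decide (i < (G.getD k' "").toList.length) && !(pvMatchG c cwi (G.getD k' "") i)))

-- A raises IndexError at position i (if the scan reaches it)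
def pvRaiseAt (w : List Char) (cw : List (Option String)) (imp : List String) (G : List String) (i : Nat) : Bool :=
  decide (i < w.length) &&
    (decide (cw.length ≤ i) ||
      (pvPatOK (w.getD i ' ') (cw.getD i none)
       && !(imp.contains (String.mk [w.getD i ' ']))
       && pvGuessRaise (w.getD i ' ') (cw.getD i none) G i))

-- Pre_ excludes exactly the inputs on which A raises IndexError: a position whose
-- current_word index, or a previous guess's index, is out of range and is reached
-- before an earlier return; on every input where A returns a value, Pre_ holds.
def Pre_is_word_possible (word : String) (current_word : List (Option String)) (included_letters : List String) (impossible_letters : List String) (previous_guesses : List String) : Prop :=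
  ∀ i, i < word.toList.length →
    (∀ j, j < i → pvPassB word.toList current_word impossible_letters previous_guesses j = true) →
    pvRaiseAt word.toList current_word impossible_letters previous_guesses i = false
instance (word : String) (current_word : List (Option String)) (included_letters : List String) (impossible_letters : List String) (previous_guesses : List String) : Decidable (Pre_is_word_possible word current_word included_letters impossible_letters previous_guesses) := by unfold Pre_is_word_possible; infer_instance

def pvWitness_is_word_possible : String × List (Option String) × List String × List String × List String :=
  ("ab", [some "a", none], ["b"], ["c"], ["ac"])

def Spec_is_word_possible (word : String) (current_word : List (Option String)) (included_letters : List String) (impossible_letters : List String) (previous_guesses : List String) (out : Bool) : Prop := out = is_word_possible_alt word current_word included_letters impossible_letters previous_guesses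
instance (word : String) (current_word : List (Option String)) (included_letters : List String) (impossible_letters : List String) (previous_guesses : List String) (out : Bool) : Decidable (Spec_is_word_possible word current_word included_letters impossible_letters previous_guesses out) := by unfold Spec_is_word_possible; infer_instance

-- ===== CLAIM (what is proved, stated in full; the proofs are below) =====
def Claim_equal_is_word_possible : Prop := ∀ (word : String) (current_word : List (Option String)) (included_letters : List String) (impossible_letters : List String) (previous_guesses : List String), Dom_is_word_possible word current_word included_letters impossible_letters previous_guesses → Pre_is_word_possible word current_word included_letters impossible_letters previous_guesses → Spec_is_word_possible word current_word included_letters impossible_letters previous_guesses (is_word_possible word current_word included_letters impossible_letters previous_guesses)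

-- ===== LEMMAS AND PROOFS =====

lemma pv_getD_w (w : List Char) (i : Nat) (c : Char) (h : w[i]? = some c) : w.getD i ' ' = c := by
  rw [List.getD_eq_getElem?_getD, h]; rfl

lemma pv_getD_cw (cw : List (Option String)) (i : Nat) (h : i < cw.length) : cw.getD i none = cw[i] := by
  rw [List.getD_eq_getElem?_getD, List.getElem?_eq_getElem h]; rfl

-- A's inner-scan condition is false for every guess once the slot is fixed and matched
lemma pv_match_fixed (c : Char) (s : String) (hcs : String.mk [c] = s) (g : String) (i : Nat) :
    pvMatchG c (some s) g i = false := by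
  rw [pvMatchG]
  rcases hq : PySem.Str.pyGet? g ((i : Nat) : Int) with _ | gc
  · rfl
  · by_cases hbe : String.mk [c] = String.mk [gc]
    · simp [hbe, ← hcs]
    · simp [hbe]

-- with no short guess reached first (pvGuessRaise = false) and no match, every guess is long enough
lemma pv_all_long (c : Char) (cwi : Option String) (G : List String) (i : Nat)
    (hGR : pvGuessRaise c cwi G i = false)
    (hmF : ∀ g ∈ G, pvMatchG c cwi g i = false) :
    ∀ g ∈ G, i < g.toList.length := by
  by_contra h'
  push_neg at h'
  obtain ⟨g0, hg0, hle0⟩ := h'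
  obtain ⟨k, hk, hgk⟩ := List.mem_iff_getElem.mp hg0
  have hex : ∃ k, k < G.length ∧ (G.getD k "").toList.length ≤ i :=
    ⟨k, hk, by rw [List.getD_eq_getElem _ _ hk, hgk]; omega⟩
  have hGR' : pvGuessRaise c cwi G i = true := by
    rw [pvGuessRaise]
    refine List.any_eq_true.mpr ⟨Nat.find hex, List.mem_range.mpr (Nat.find_spec hex).1, ?_⟩
    rw [Bool.and_eq_true]
    refine ⟨by simpa using (Nat.find_spec hex).2, List.all_eq_true.mpr ?_⟩
    intro k' hk'
    have hk'lt := List.mem_range.mp hk'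
    have hk'G : k' < G.length := lt_trans hk'lt (Nat.find_spec hex).1
    have hnot := Nat.find_min hex hk'lt
    have hlong' : i < (G.getD k' "").toList.length := by
      by_contra hc
      push_neg at hc
      exact hnot ⟨hk'G, hc⟩
    have hmem : G.getD k' "" ∈ G := by
      rw [List.getD_eq_getElem _ _ hk'G]
      exact List.getElem_mem hk'G
    rw [Bool.and_eq_true]
    have hmf' := hmF _ hmem
    exact ⟨by simpa using hlong', by rw [hmf']; rfl⟩
  rw [hGR'] at hGR
  cases hGR

lemma pv_loop_eq (word : String) (current_word : List (Option String)) (included_letters : List String) (impossible_letters : List String) (previous_guesses : List String)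
    (hPre : Pre_is_word_possible word current_word included_letters impossible_letters previous_guesses) :
    ∀ (cs : List Char) (i : Nat), word.toList.drop i = cs →
      (∀ j, j < i → pvPassB word.toList current_word impossible_letters previous_guesses j = true) →
      pvALoop current_word included_letters impossible_letters previous_guesses word (i : Int) cs
        = (pvBok word.toList current_word impossible_letters previous_guesses i
            && included_letters.all (fun l => PySem.Str.isIn l word)) := by
  intro cs
  induction cs with
  | nil =>
    intro i hdrop _
    have hn : word.toList.length ≤ i := List.drop_eq_nil_iff.mp hdrop
    rw [pvALoop, pvBok, dif_neg (by omega)]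
    cases hx : included_letters.all (fun l => PySem.Str.isIn l word) with
    | true =>
      have hany : included_letters.any (fun l => !(PySem.Str.isIn l word)) = false := by
        refine List.any_eq_false.mpr ?_
        intro l hl
        rw [List.all_eq_true.mp hx l hl]
        simp
      rw [hany]
      simp
    | false =>
      obtain ⟨l, hl, hpl⟩ := List.all_eq_false.mp hx
      have hany : included_letters.any (fun l => !(PySem.Str.isIn l word)) = true :=
        List.any_eq_true.mpr ⟨l, hl, by simpa using hpl⟩
      rw [hany]
      simp
  | cons c rest ih =>
    intro i hdrop hpass
    have hi : i < word.toList.length := by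
      by_contra h'
      push_neg at h'
      rw [List.drop_eq_nil_of_le h'] at hdrop
      cases hdrop
    have hwc : word.toList[i]? = some c := by
      have h0 : (word.toList.drop i)[0]? = some c := by rw [hdrop]; rfl
      rwa [List.getElem?_drop, Nat.add_zero] at h0
    have hwi : word.toList[i] = c := by
      have h1 := hwc
      rw [List.getElem?_eq_getElem hi] at h1
      exact Option.some.inj h1
    have hrest : word.toList.drop (i+1) = rest := by
      have h1 : word.toList.drop (i+1) = (word.toList.drop i).drop 1 := by
        rw [List.drop_drop]
      rw [h1, hdrop]
      rfl
    have hR := hPre i hi hpass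
    rw [pvRaiseAt, pv_getD_w _ _ _ hwc] at hR
    simp only [hi, decide_true, Bool.true_and, Bool.or_eq_false_iff] at hR
    obtain ⟨hcwlen, hX⟩ := hR
    have hcw : i < current_word.length := by
      simpa using hcwlen
    rw [pv_getD_cw _ _ hcw] at hX
    have hcwi? : current_word[i]? = some current_word[i] := List.getElem?_eq_getElem hcw
    have hpy : PySem.List.pyGet? current_word (i : Int) = some current_word[i] :=
      PySem.List.pyGet?_ofNat current_word i hcw
    have hpassStep : pvPatOK c current_word[i] = true →
        impossible_letters.contains (String.mk [c]) = false →
        (∀ g ∈ previous_guesses, pvMatchG c current_word[i] g i = false) →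
        (∀ g ∈ previous_guesses, i < g.toList.length) →
        ∀ j, j < i + 1 → pvPassB word.toList current_word impossible_letters previous_guesses j = true := by
      intro hpOK himpF hmF hlong j hj
      rcases Nat.lt_succ_iff_lt_or_eq.mp hj with h | h
      · exact hpass j h
      · subst h
        rw [pvPassB, pv_getD_w _ _ _ hwc, pv_getD_cw _ _ hcw]
        simp only [hi, hcw, decide_true, Bool.true_and, hpOK, himpF, Bool.not_false]
        refine List.all_eq_true.mpr ?_
        intro g hg
        rw [Bool.and_eq_true]
        exact ⟨by simpa using hlong g hg, by simp [hmF g hg]⟩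
    have hcast : ((i : Nat) : Int) + 1 = (((i + 1 : Nat)) : Int) := by push_cast; ring
    rcases hq : current_word[i] with _ | s
    · -- open slot: A's pattern test is false; the two guess scans agree
      rw [hq] at hX hcwi? hpy hpassStep
      rw [pvALoop]
      simp only [hpy]
      rw [pvBok, dif_pos hi]
      simp only [hcwi?, hwi]
      by_cases himp : impossible_letters.contains (String.mk [c]) = true
      · rw [if_pos himp, if_pos himp]
        simp
      · have himpF : impossible_letters.contains (String.mk [c]) = false := by simpa using himp
        rw [if_neg himp, if_neg himp]
        have hGR : pvGuessRaise c none previous_guesses i = false := by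
          have hp : pvPatOK c none = true := rfl
          rw [hp, himpF] at hX
          simpa using hX
        have hfun : (fun guess => (match PySem.Str.pyGet? guess ((i : Nat) : Int) with
            | none => false
            | some gc => String.mk [c] == String.mk [gc] && decide ((none : Option String) ≠ some (String.mk [gc])))) = fun g => pvMatchG c none g i := by
          funext g
          rw [pvMatchG]
        rw [hfun]
        have hsame : previous_guesses.any (fun g =>
            (match PySem.Str.pyGet? g ((i : Nat) : Int) with
             | none => false
             | some gc => String.mk [c] == String.mk [gc]))
            = previous_guesses.any (fun g => pvMatchG c none g i) := by
          refine congrArg _ (funext fun g => ?_)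
          rw [pvMatchG]
          cases PySem.Str.pyGet? g ((i : Nat) : Int) with
          | none => rfl
          | some gc => simp
        by_cases hA : (previous_guesses.any fun g => pvMatchG c none g i) = true
        · rw [if_pos hA, if_pos (hsame.trans hA)]
          simp
        · have hAf : (previous_guesses.any fun g => pvMatchG c none g i) = false := by
            simpa using hA
          rw [if_neg hA, if_neg (fun h => hA (hsame.symm.trans h))]
          have hmF : ∀ g ∈ previous_guesses, pvMatchG c none g i = false :=
            fun g hg => by simpa using List.any_eq_false.mp hAf g hg
          have hlong := pv_all_long c none previous_guesses i hGR hmF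
          rw [hcast, ih (i+1) hrest (hpassStep rfl himpF hmF hlong)]
          simp
    · -- fixed slot
      rw [hq] at hX hcwi? hpy hpassStep
      rw [pvALoop]
      simp only [hpy]
      rw [pvBok, dif_pos hi]
      simp only [hcwi?, hwi]
      by_cases hbs : (String.mk [c] != s) = true
      · -- pattern failure: both sides return false
        rw [if_pos hbs]
        by_cases himp : impossible_letters.contains (String.mk [c]) = true
        · rw [if_pos himp]
          simp
        · rw [if_neg himp, if_pos hbs]
          simp
      · have hcs : String.mk [c] = s := by simpa using hbs
        have hpOK : pvPatOK c (some s) = true := by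
          rw [pvPatOK]
          simpa using hcs
        rw [if_neg hbs]
        by_cases himp : impossible_letters.contains (String.mk [c]) = true
        · rw [if_pos himp, if_pos himp]
          simp
        · have himpF : impossible_letters.contains (String.mk [c]) = false := by simpa using himp
          rw [if_neg himp, if_neg himp]
          have hGR : pvGuessRaise c (some s) previous_guesses i = false := by
            rw [hpOK, himpF] at hX
            simpa using hX
          have hmF : ∀ g ∈ previous_guesses, pvMatchG c (some s) g i = false :=
            fun g _ => pv_match_fixed c s hcs g i
          have hfun : (fun guess => (match PySem.Str.pyGet? guess ((i : Nat) : Int) with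
              | none => false
              | some gc => String.mk [c] == String.mk [gc] && decide (some s ≠ some (String.mk [gc])))) = fun g => pvMatchG c (some s) g i := by
            funext g
            rw [pvMatchG]
          rw [hfun]
          have hA : previous_guesses.any (fun g => pvMatchG c (some s) g i) = false :=
            List.any_eq_false.mpr fun g hg => by simp [hmF g hg]
          have hAn : ¬((previous_guesses.any fun g => pvMatchG c (some s) g i) = true) := by
            simp [hA]
          rw [if_neg hAn, if_neg hbs]
          have hlong := pv_all_long c (some s) previous_guesses i hGR hmF
          rw [hcast, ih (i+1) hrest (hpassStep hpOK himpF hmF hlong)]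

-- ===== VERDICT (by name: the statement is the Claim_ definition above) =====
theorem is_word_possible_spec : Claim_equal_is_word_possible := by
  intro word current_word included_letters impossible_letters previous_guesses _ hPre
  unfold Spec_is_word_possible is_word_possible is_word_possible_alt
  have h := pv_loop_eq word current_word included_letters impossible_letters previous_guesses hPre word.toList 0 (by simp) (by intro j hj; omega)
  rw [Nat.cast_zero] at h
  rw [h]
  cases hx : included_letters.any (fun l => !(PySem.Str.isIn l word)) with
  | true =>
    rw [if_pos rfl]
    obtain ⟨l, hl, hpl⟩ := List.any_eq_true.mp hx
    rw [List.all_eq_false.mpr ⟨l, hl, by simpa using hpl⟩]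
    simp
  | false =>
    rw [if_neg (by simp)]
    rw [List.all_eq_true.mpr (fun l hl => by simpa using List.any_eq_false.mp hx l hl)]
    simp
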